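-- pv_equiv track=rewrite | github.com/astroferreira/MINUANOv2 | scripts/run_source_extraction_for_mfmtk.py | _build_tiles
-- ===== SOURCE A (Python) =====
-- def _split_range(total: int, parts: int) -> list[tuple[int, int]]:
--     if parts <= 0:
--         raise ValueError("parts must be > 0")
--     base = total // parts
--     rem = total % parts
--     out: list[tuple[int, int]] = []
--     start = 0
--     for i in range(parts):
--         size = base + (1 if i < rem else 0)
--         end = start + size
--         out.append((start, end))
--         start = end
--     return out
--
-- def _build_tiles(
--     width: int,
--     height: int,
--     nrows: int,
--     ncols: int,
--     overlap: int,
-- ) -> list[dict[str, int]]: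
--     x_splits = _split_range(width, ncols)
--     y_splits = _split_range(height, nrows)
--     tiles: list[dict[str, int]] = []
--     for r, (y0_base, y1_base) in enumerate(y_splits):
--         for c, (x0_base, x1_base) in enumerate(x_splits):
--             x0 = max(0, x0_base - overlap)
--             x1 = min(width, x1_base + overlap)
--             y0 = max(0, y0_base - overlap)
--             y1 = min(height, y1_base + overlap)
--             tiles.append(
--                 {
--                     "row": r,
--                     "col": c,
--                     "x0": x0,
--                     "x1": x1,
--                     "y0": y0,
--                     "y1": y1,
--                     "core_x0": x0_base,
--                     "core_x1": x1_base,
--                     "core_y0": y0_base,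
--                     "core_y1": y1_base,
--                 }
--             )
--     return tiles
-- ===== SOURCE B (Python) =====
-- def _build_tiles(width, height, nrows, ncols, overlap):
--     if nrows <= 0 or ncols <= 0:
--         raise ValueError("parts must be > 0")
--
--     def bound(total, parts, i):
--         # start of part i in the front-loaded even split of `total` into `parts`
--         return i * (total // parts) + min(i, total % parts)
--
--     return [
--         {
--             "row": r,
--             "col": c,
--             "x0": max(0, bound(width, ncols, c) - overlap),
--             "x1": min(width, bound(width, ncols, c + 1) + overlap),
--             "y0": max(0, bound(height, nrows, r) - overlap),
--             "y1": min(height, bound(height, nrows, r + 1) + overlap),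
--             "core_x0": bound(width, ncols, c),
--             "core_x1": bound(width, ncols, c + 1),
--             "core_y0": bound(height, nrows, r),
--             "core_y1": bound(height, nrows, r + 1),
--         }
--         for r in range(nrows)
--         for c in range(ncols)
--     ]
-- ===== Notes on version B (the rewrite author's own statement) =====
-- stated objective: alternative
-- what changed: Replaces the accumulator-driven _split_range (running start/end lists that are then enumerated) with a closed-form boundary formula bound(total,parts,i)=i*(total//parts)+min(i,total%parts) used directly inside a single comprehension over row/col indices.
import Mathlib
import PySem

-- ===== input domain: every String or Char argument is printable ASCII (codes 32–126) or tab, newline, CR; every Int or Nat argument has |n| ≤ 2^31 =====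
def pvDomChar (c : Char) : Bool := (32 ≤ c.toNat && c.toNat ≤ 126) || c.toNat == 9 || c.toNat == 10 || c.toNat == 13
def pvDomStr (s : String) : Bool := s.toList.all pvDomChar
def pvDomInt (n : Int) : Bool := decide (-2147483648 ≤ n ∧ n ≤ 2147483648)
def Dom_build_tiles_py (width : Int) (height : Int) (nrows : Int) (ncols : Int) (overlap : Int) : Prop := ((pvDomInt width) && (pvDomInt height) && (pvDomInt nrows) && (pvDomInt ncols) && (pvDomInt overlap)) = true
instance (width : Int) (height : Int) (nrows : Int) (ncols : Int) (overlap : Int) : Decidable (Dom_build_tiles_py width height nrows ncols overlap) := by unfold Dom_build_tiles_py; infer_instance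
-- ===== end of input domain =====

-- B replaces the accumulator-based _split_range with a closed-form boundary formula (alternative decomposition, same cost).


-- ===== PORT A =====
-- _split_range: accumulator loop (the parts<=0 ValueError is excluded by Pre_)
def splitRange (total : Int) (parts : Int) : List (Int × Int) :=
  let base := PySem.Int.floordiv total parts
  let rem := PySem.Int.mod total parts
  (((PySem.List.pyRange 0 parts 1).foldl
      (fun (st : List (Int × Int) × Int) i =>
        let size := base + (if i < rem then (1 : Int) else 0)
        let e := st.2 + size
        (st.1 ++ [(st.2, e)], e))
      ([], 0))).1

def build_tiles_py (width : Int) (height : Int) (nrows : Int) (ncols : Int) (overlap : Int) : List (List (String × Int)) :=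
  let x_splits := splitRange width ncols
  let y_splits := splitRange height nrows
  (PySem.List.enumerate y_splits).foldl
    (fun tiles ry =>
      (PySem.List.enumerate x_splits).foldl
        (fun tiles cx =>
          let r := ry.1; let y0_base := ry.2.1; let y1_base := ry.2.2
          let c := cx.1; let x0_base := cx.2.1; let x1_base := cx.2.2
          let x0 := max 0 (x0_base - overlap)
          let x1 := min width (x1_base + overlap)
          let y0 := max 0 (y0_base - overlap)
          let y1 := min height (y1_base + overlap)
          tiles ++ [[("row", r), ("col", c), ("x0", x0), ("x1", x1),
                     ("y0", y0), ("y1", y1),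
                     ("core_x0", x0_base), ("core_x1", x1_base),
                     ("core_y0", y0_base), ("core_y1", y1_base)]])
        tiles)
    []

-- ===== PORT B =====
-- closed-form split boundary
def pvBound (total : Int) (parts : Int) (i : Int) : Int :=
  i * PySem.Int.floordiv total parts + min i (PySem.Int.mod total parts)

def build_tiles_py_alt (width : Int) (height : Int) (nrows : Int) (ncols : Int) (overlap : Int) : List (List (String × Int)) :=
  (PySem.List.pyRange 0 nrows 1).flatMap (fun r =>
    (PySem.List.pyRange 0 ncols 1).map (fun c =>
      [("row", r), ("col", c),
       ("x0", max 0 (pvBound width ncols c - overlap)),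
       ("x1", min width (pvBound width ncols (c + 1) + overlap)),
       ("y0", max 0 (pvBound height nrows r - overlap)),
       ("y1", min height (pvBound height nrows (r + 1) + overlap)),
       ("core_x0", pvBound width ncols c),
       ("core_x1", pvBound width ncols (c + 1)),
       ("core_y0", pvBound height nrows r),
       ("core_y1", pvBound height nrows (r + 1))]))

-- ===== PRECONDITION & SPEC =====
-- A raises ValueError when nrows <= 0 or ncols <= 0; B raises there too.
def Pre_build_tiles_py (width : Int) (height : Int) (nrows : Int) (ncols : Int) (overlap : Int) : Prop :=
  0 < nrows ∧ 0 < ncols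
instance (width : Int) (height : Int) (nrows : Int) (ncols : Int) (overlap : Int) : Decidable (Pre_build_tiles_py width height nrows ncols overlap) := by unfold Pre_build_tiles_py; infer_instance

def pvWitness_build_tiles_py : Int × Int × Int × Int × Int := (10, 8, 2, 3, 1)

def Spec_build_tiles_py (width : Int) (height : Int) (nrows : Int) (ncols : Int) (overlap : Int) (out : List (List (String × Int))) : Prop := out = build_tiles_py_alt width height nrows ncols overlap
instance (width : Int) (height : Int) (nrows : Int) (ncols : Int) (overlap : Int) (out : List (List (String × Int))) : Decidable (Spec_build_tiles_py width height nrows ncols overlap out) := by unfold Spec_build_tiles_py; infer_instance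

-- ===== CLAIM (what is proved, stated in full; the proofs are below) =====
def Claim_equal_build_tiles_py : Prop := ∀ (width : Int) (height : Int) (nrows : Int) (ncols : Int) (overlap : Int), Dom_build_tiles_py width height nrows ncols overlap → Pre_build_tiles_py width height nrows ncols overlap → Spec_build_tiles_py width height nrows ncols overlap (build_tiles_py width height nrows ncols overlap)

-- ===== LEMMAS AND PROOFS =====

-- the split-range accumulator computes the closed-form boundaries
theorem splitRange_loop (total parts : Int) (hp : 0 < parts) :
    ∀ (n : Nat) (j : Int), 0 ≤ j → j + n = parts → ∀ (acc : List (Int × Int)),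
    (((PySem.List.pyRange j parts 1).foldl
      (fun (st : List (Int × Int) × Int) i =>
        let size := PySem.Int.floordiv total parts + (if i < PySem.Int.mod total parts then (1 : Int) else 0)
        let e := st.2 + size
        (st.1 ++ [(st.2, e)], e))
      (acc, pvBound total parts j))).1
    = acc ++ (PySem.List.pyRange j parts 1).map
        (fun i => (pvBound total parts i, pvBound total parts (i + 1))) := by
  intro n
  induction n with
  | zero =>
    intro j hj hjn acc
    rw [PySem.List.pyRange_one_eq_nil (by omega)]
    simp
  | succ m ih =>
    intro j hj hjn acc
    rw [PySem.List.pyRange_one_cons (by omega)]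
    have hb : pvBound total parts j +
        (PySem.Int.floordiv total parts + (if j < PySem.Int.mod total parts then (1 : Int) else 0))
        = pvBound total parts (j + 1) := by
      have hr : 0 ≤ PySem.Int.mod total parts := PySem.Int.mod_nonneg total hp
      unfold pvBound
      by_cases h : j < PySem.Int.mod total parts
      · rw [min_eq_left (by omega), min_eq_left (by omega), if_pos h]; ring
      · rw [min_eq_right (by omega), min_eq_right (by omega), if_neg h]; ring
    simp only [List.foldl_cons, List.map_cons]
    rw [hb]
    rw [ih (j + 1) (by omega) (by omega) (acc ++ [(pvBound total parts j, pvBound total parts (j + 1))])]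
    simp

theorem splitRange_eq (total parts : Int) (hp : 0 < parts) :
    splitRange total parts
    = (PySem.List.pyRange 0 parts 1).map
        (fun i => (pvBound total parts i, pvBound total parts (i + 1))) := by
  unfold splitRange
  have hb0 : pvBound total parts 0 = 0 := by
    unfold pvBound
    have hr : 0 ≤ PySem.Int.mod total parts := PySem.Int.mod_nonneg total hp
    simp [min_eq_left hr]
  have := splitRange_loop total parts hp parts.toNat 0 le_rfl (by omega) []
  rw [hb0] at this
  simpa using this

-- enumerating the image of [a, b) under f pairs each index with its image
theorem enumerate_map_pyRange {α : Type} (f : Int → α) (a b : Int) :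
    ∀ (n : Nat), a + n = b →
    PySem.List.enumerate ((PySem.List.pyRange a b 1).map f) a
    = (PySem.List.pyRange a b 1).map (fun i => (i, f i)) := by
  intro n
  induction n generalizing a with
  | zero =>
    intro hab
    rw [PySem.List.pyRange_one_eq_nil (by omega)]
    simp
  | succ m ih =>
    intro hab
    rw [PySem.List.pyRange_one_cons (by omega)]
    simp only [List.map_cons, PySem.List.enumerate_cons]
    rw [ih (a + 1) (by omega)]

-- ===== VERDICT (by name: the statement is the Claim_ definition above) =====
theorem build_tiles_py_spec : Claim_equal_build_tiles_py := by
  intro width height nrows ncols overlap _hdom hpre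
  obtain ⟨hr, hc⟩ := hpre
  unfold Spec_build_tiles_py build_tiles_py build_tiles_py_alt
  rw [splitRange_eq width ncols hc, splitRange_eq height nrows hr]
  simp only []
  rw [enumerate_map_pyRange _ 0 nrows nrows.toNat (by omega),
      enumerate_map_pyRange _ 0 ncols ncols.toNat (by omega)]
  rw [List.foldl_map]
  simp only [List.foldl_map, PySem.List.foldl_append_singleton_eq_map]
  rw [PySem.List.foldl_append_eq_flatMap
        (g := fun r => (PySem.List.pyRange 0 ncols 1).map (fun c =>
          [("row", r), ("col", c),
           ("x0", max 0 (pvBound width ncols c - overlap)),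
           ("x1", min width (pvBound width ncols (c + 1) + overlap)),
           ("y0", max 0 (pvBound height nrows r - overlap)),
           ("y1", min height (pvBound height nrows (r + 1) + overlap)),
           ("core_x0", pvBound width ncols c),
           ("core_x1", pvBound width ncols (c + 1)),
           ("core_y0", pvBound height nrows r),
           ("core_y1", pvBound height nrows (r + 1))]))]
  simp
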